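-- pv_equiv track=rewrite | github.com/nikgora/DevelopCompilytors | Algorithms_for_searching_nonTerminals.py | find_unreachable_nonterminals
-- ===== SOURCE A (Python) =====
-- def find_unreachable_nonterminals(grammar, start_symbol, non_terminals):
--     reachable = set()
--     to_process = {start_symbol}
--
--     while to_process:
--         current = to_process.pop()
--         if current not in reachable:
--             reachable.add(current)
--             for production in grammar.get(current, []):
--                 for symbol in production:
--                     if symbol in non_terminals and symbol not in reachable:
--                         to_process.add(symbol)
--
--     unreachable = set(grammar.keys()) - reachable
--     return unreachable
-- ===== SOURCE B (Python) =====
-- def find_unreachable_nonterminals(grammar, start_symbol, non_terminals):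
--     # round-based fixed-point saturation instead of an element-wise worklist
--     reachable = {start_symbol}
--     while True:
--         new = {symbol
--                for node in reachable
--                for production in grammar.get(node, [])
--                for symbol in production
--                if symbol in non_terminals and symbol not in reachable}
--         if not new:
--             break
--         reachable |= new
--     return {key for key in grammar if key not in reachable}
-- ===== Notes on version B (the rewrite author's own statement) =====
-- stated objective: alternative
-- what changed: Replaced A's element-wise worklist (pop one symbol, push its unseen successors) with a round-based fixed-point saturation: each round collects every new non-terminal appearing in productions of the current reachable set and stops when a round adds nothing.
import Mathlib
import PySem

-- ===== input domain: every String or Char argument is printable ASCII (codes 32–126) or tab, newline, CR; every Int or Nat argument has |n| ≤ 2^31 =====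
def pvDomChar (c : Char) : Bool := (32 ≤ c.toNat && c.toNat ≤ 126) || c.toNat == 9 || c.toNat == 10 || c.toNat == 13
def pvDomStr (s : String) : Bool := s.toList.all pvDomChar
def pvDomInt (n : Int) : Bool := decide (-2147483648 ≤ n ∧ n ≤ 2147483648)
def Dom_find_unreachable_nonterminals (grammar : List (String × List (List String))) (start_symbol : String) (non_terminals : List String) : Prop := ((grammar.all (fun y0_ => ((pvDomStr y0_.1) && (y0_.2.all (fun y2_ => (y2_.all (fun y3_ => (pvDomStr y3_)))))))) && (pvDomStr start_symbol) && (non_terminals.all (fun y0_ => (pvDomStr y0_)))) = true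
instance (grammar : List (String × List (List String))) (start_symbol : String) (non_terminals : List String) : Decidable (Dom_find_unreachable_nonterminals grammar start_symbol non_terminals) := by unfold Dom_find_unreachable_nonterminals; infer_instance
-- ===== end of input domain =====

-- B replaces A's element-wise worklist with a round-based fixed-point saturation over the whole
-- reachable set; same reachable set, same returned set (objective: alternative decomposition).
-- Python set.pop() removes an arbitrary element; the port pops the first-inserted one, which
-- yields the same final set since reachability is order-independent.

-- ===== PORT A =====
-- helper lemmas the ports cite for their termination / invariant arguments
-- (full membership characterisation of the conditional "add to set" double loop)
theorem pvSymFold_mem (nts res : List String) (p : List String) (t0 : List String) (x : String) :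
    x ∈ p.foldl (fun t symbol => if symbol ∈ nts ∧ symbol ∉ res then PySem.Set.add t symbol else t) t0 ↔
      x ∈ t0 ∨ (x ∈ nts ∧ x ∉ res ∧ x ∈ p) := by
  induction p generalizing t0 with
  | nil => simp
  | cons s p ih =>
    simp only [List.foldl_cons, ih, List.mem_cons]
    by_cases hs : s ∈ nts ∧ s ∉ res
    · simp only [if_pos hs, PySem.Set.mem_add]
      constructor
      · intro h
        rcases h with (h | rfl) | h
        · exact Or.inl h
        · exact Or.inr ⟨hs.1, hs.2, Or.inl rfl⟩
        · exact Or.inr ⟨h.1, h.2.1, Or.inr h.2.2⟩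
      · intro h
        rcases h with h | ⟨h1, h2, (rfl | h3)⟩
        · exact Or.inl (Or.inl h)
        · exact Or.inl (Or.inr rfl)
        · exact Or.inr ⟨h1, h2, h3⟩
    · simp only [if_neg hs]
      constructor
      · intro h
        rcases h with h | h
        · exact Or.inl h
        · exact Or.inr ⟨h.1, h.2.1, Or.inr h.2.2⟩
      · intro h
        rcases h with h | ⟨h1, h2, (rfl | h3)⟩
        · exact Or.inl h
        · exact absurd ⟨h1, h2⟩ hs
        · exact Or.inr ⟨h1, h2, h3⟩

theorem pvProdsFold_mem (nts res : List String) (prods : List (List String)) (t0 : List String) (x : String) :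
    x ∈ prods.foldl (fun t production => production.foldl
        (fun t symbol => if symbol ∈ nts ∧ symbol ∉ res then PySem.Set.add t symbol else t) t) t0 ↔
      x ∈ t0 ∨ (x ∈ nts ∧ x ∉ res ∧ ∃ p ∈ prods, x ∈ p) := by
  induction prods generalizing t0 with
  | nil => simp
  | cons p prods ih =>
    simp only [List.foldl_cons, ih, pvSymFold_mem, List.mem_cons]
    constructor
    · intro h
      rcases h with (h | ⟨h1, h2, h3⟩) | ⟨h1, h2, q, hq, hx⟩
      · exact Or.inl h
      · exact Or.inr ⟨h1, h2, p, Or.inl rfl, h3⟩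
      · exact Or.inr ⟨h1, h2, q, Or.inr hq, hx⟩
    · intro h
      rcases h with h | ⟨h1, h2, q, (rfl | hq), hx⟩
      · exact Or.inl (Or.inl h)
      · exact Or.inl (Or.inr ⟨h1, h2, hx⟩)
      · exact Or.inr ⟨h1, h2, q, hq, hx⟩

-- A's worklist loop.  `U` bounds every symbol that can ever enter the worklist
-- (needed only for termination); `to_process.pop()` is modelled as popping the head.
def pvLoopA (g : PySem.Dict String (List (List String))) (nts U : List String)
    (hU : ∀ x ∈ nts, x ∈ U)
    (reachable todo : List String) (h : ∀ x ∈ todo, x ∈ U) : List String :=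
  match todo with
  | [] => reachable
  | current :: rest =>
    if hc : current ∈ reachable then
      pvLoopA g nts U hU reachable rest (fun x hx => h x (List.mem_cons_of_mem _ hx))
    else
      let reachable' := PySem.Set.add reachable current
      let todo' := (PySem.Dict.getD g current []).foldl
          (fun t production => production.foldl
            (fun t symbol => if symbol ∈ nts ∧ symbol ∉ reachable' then PySem.Set.add t symbol else t) t) rest
      pvLoopA g nts U hU reachable' todo' (fun x hx => by
        rcases (pvProdsFold_mem nts reachable' _ rest x).1 hx with h1 | h2
        · exact h x (List.mem_cons_of_mem _ h1)
        · exact hU x h2.1)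
  termination_by ((U.toFinset \ reachable.toFinset).card, todo.length)
  decreasing_by
  · exact Prod.Lex.right _ (by simp)
  · apply Prod.Lex.left
    apply Finset.card_lt_card
    constructor
    · intro x hx
      simp only [Finset.mem_sdiff, List.mem_toFinset] at *
      refine ⟨hx.1, fun hm => hx.2 ?_⟩
      exact (PySem.Set.mem_add ..).2 (Or.inl hm)
    · intro hsub
      have hcur : current ∈ U.toFinset \ (PySem.Set.add reachable current).toFinset := by
        have := hsub (by
          simp only [Finset.mem_sdiff, List.mem_toFinset]
          exact ⟨h current (List.mem_cons_self ..), hc⟩)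
        exact this
      simp only [Finset.mem_sdiff, List.mem_toFinset] at hcur
      exact hcur.2 ((PySem.Set.mem_add ..).2 (Or.inr rfl))

def find_unreachable_nonterminals (grammar : List (String × List (List String))) (start_symbol : String) (non_terminals : List String) : List String :=
  let g := PySem.Dict.mk grammar
  let reachable := pvLoopA g non_terminals (start_symbol :: non_terminals)
      (fun x hx => List.mem_cons_of_mem _ hx) [] [start_symbol]
      (fun x hx => by simp_all)
  PySem.Set.diff (PySem.Set.ofList (PySem.Dict.keys g)) reachable

-- ===== PORT B =====
-- one saturation round: the set comprehension over all of `reachable`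
def pvNewB (g : PySem.Dict String (List (List String))) (nts reachable : List String) : List String :=
  reachable.foldl (fun t node => (PySem.Dict.getD g node []).foldl
      (fun t production => production.foldl
        (fun t symbol => if symbol ∈ nts ∧ symbol ∉ reachable then PySem.Set.add t symbol else t) t) t)
    ([] : List String)

theorem pvNewB_mem (g : PySem.Dict String (List (List String))) (nts reachable : List String) (x : String) :
    x ∈ pvNewB g nts reachable ↔
      x ∈ nts ∧ x ∉ reachable ∧ ∃ a ∈ reachable, ∃ p ∈ PySem.Dict.getD g a [], x ∈ p := by
  have h : ∀ (l : List String) (t0 : List String),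
      x ∈ l.foldl (fun t node => (PySem.Dict.getD g node []).foldl
        (fun t production => production.foldl
          (fun t symbol => if symbol ∈ nts ∧ symbol ∉ reachable then PySem.Set.add t symbol else t) t) t) t0 ↔
      x ∈ t0 ∨ (x ∈ nts ∧ x ∉ reachable ∧ ∃ a ∈ l, ∃ p ∈ PySem.Dict.getD g a [], x ∈ p) := by
    intro l
    induction l with
    | nil => simp
    | cons a l ih =>
      intro t0
      simp only [List.foldl_cons, ih, pvProdsFold_mem, List.mem_cons]
      constructor
      · intro h
        rcases h with (h1 | ⟨h1, h2, h3⟩) | ⟨h1, h2, b, hb, hp⟩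
        · exact Or.inl h1
        · exact Or.inr ⟨h1, h2, a, Or.inl rfl, h3⟩
        · exact Or.inr ⟨h1, h2, b, Or.inr hb, hp⟩
      · intro h
        rcases h with h1 | ⟨h1, h2, b, (rfl | hb), hp⟩
        · exact Or.inl (Or.inl h1)
        · exact Or.inl (Or.inr ⟨h1, h2, hp⟩)
        · exact Or.inr ⟨h1, h2, b, hb, hp⟩
  unfold pvNewB
  rw [h reachable []]
  simp only [List.not_mem_nil, false_or]

-- B's saturation loop: repeat rounds until no new symbol appears
def pvSatB (g : PySem.Dict String (List (List String))) (nts U : List String)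
    (hU : ∀ x ∈ nts, x ∈ U)
    (reachable : List String) (h : ∀ x ∈ reachable, x ∈ U) : List String :=
  let new := pvNewB g nts reachable
  if hn : new = [] then reachable
  else
    pvSatB g nts U hU (PySem.Set.union reachable new) (fun x hx => by
      rcases (PySem.Set.mem_union ..).1 hx with h1 | h1
      · exact h x h1
      · exact hU x ((pvNewB_mem ..).1 h1).1)
  termination_by (U.toFinset \ reachable.toFinset).card
  decreasing_by
    apply Finset.card_lt_card
    obtain ⟨w, hw⟩ := List.exists_mem_of_ne_nil _ hn
    have hwp := (pvNewB_mem ..).1 hw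
    constructor
    · intro x hx
      simp only [Finset.mem_sdiff, List.mem_toFinset] at *
      exact ⟨hx.1, fun hm => hx.2 ((PySem.Set.mem_union ..).2 (Or.inl hm))⟩
    · intro hsub
      have := hsub (by
        simp only [Finset.mem_sdiff, List.mem_toFinset]
        exact ⟨hU w hwp.1, hwp.2.1⟩)
      simp only [Finset.mem_sdiff, List.mem_toFinset] at this
      exact this.2 ((PySem.Set.mem_union ..).2 (Or.inr hw))

def find_unreachable_nonterminals_alt (grammar : List (String × List (List String))) (start_symbol : String) (non_terminals : List String) : List String :=
  let g := PySem.Dict.mk grammar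
  let reachable := pvSatB g non_terminals (start_symbol :: non_terminals)
      (fun x hx => List.mem_cons_of_mem _ hx) [start_symbol]
      (fun x hx => by simp_all)
  PySem.Set.diff (PySem.Set.ofList (PySem.Dict.keys g)) reachable

-- ===== PRECONDITION & SPEC =====
def Spec_find_unreachable_nonterminals (grammar : List (String × List (List String))) (start_symbol : String) (non_terminals : List String) (out : List String) : Prop := out = find_unreachable_nonterminals_alt grammar start_symbol non_terminals
instance (grammar : List (String × List (List String))) (start_symbol : String) (non_terminals : List String) (out : List String) : Decidable (Spec_find_unreachable_nonterminals grammar start_symbol non_terminals out) := by unfold Spec_find_unreachable_nonterminals; infer_instance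

-- ===== CLAIM (what is proved, stated in full; the proofs are below) =====
def Claim_equal_find_unreachable_nonterminals : Prop := ∀ (grammar : List (String × List (List String))) (start_symbol : String) (non_terminals : List String), Dom_find_unreachable_nonterminals grammar start_symbol non_terminals → Spec_find_unreachable_nonterminals grammar start_symbol non_terminals (find_unreachable_nonterminals grammar start_symbol non_terminals)

-- ===== LEMMAS AND PROOFS =====

-- one grammar step: `b` is a non-terminal occurring in some production of `a`
def pvStep (g : PySem.Dict String (List (List String))) (nts : List String) (a b : String) : Prop :=
  b ∈ nts ∧ ∃ p ∈ PySem.Dict.getD g a [], b ∈ p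

-- ---- A's loop computes exactly the reachability closure of the worklist ----
theorem pvLoopA_sound (g : PySem.Dict String (List (List String))) (nts U : List String)
    (hU : ∀ x ∈ nts, x ∈ U) :
    ∀ (reachable todo : List String) (h : ∀ x ∈ todo, x ∈ U) (x : String),
      x ∈ pvLoopA g nts U hU reachable todo h →
      x ∈ reachable ∨ ∃ t ∈ todo, Relation.ReflTransGen (pvStep g nts) t x := by
  intro reachable todo h
  induction reachable, todo, h using pvLoopA.induct g nts U hU with
  | case1 reachable h =>
    intro x hx
    rw [pvLoopA] at hx
    exact Or.inl hx
  | case2 reachable current rest h2 hc h ih =>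
    intro x hx
    rw [pvLoopA, dif_pos hc] at hx
    rcases ih x hx with h1 | ⟨t, ht, hr⟩
    · exact Or.inl h1
    · exact Or.inr ⟨t, List.mem_cons_of_mem _ ht, hr⟩
  | case3 reachable current rest h2 hc reachable' todo' h ih =>
    intro x hx
    rw [pvLoopA, dif_neg hc] at hx
    rcases ih x hx with h1 | ⟨t, ht, hr⟩
    · rcases (PySem.Set.mem_add ..).1 h1 with h1 | rfl
      · exact Or.inl h1
      · exact Or.inr ⟨x, List.mem_cons_self, Relation.ReflTransGen.refl⟩
    · rcases (pvProdsFold_mem ..).1 ht with h1 | ⟨hn1, hn2, p, hp, hsp⟩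
      · exact Or.inr ⟨t, List.mem_cons_of_mem _ h1, hr⟩
      · exact Or.inr ⟨current, List.mem_cons_self, Relation.ReflTransGen.head ⟨hn1, p, hp, hsp⟩ hr⟩

theorem pvLoopA_complete (g : PySem.Dict String (List (List String))) (nts U : List String)
    (hU : ∀ x ∈ nts, x ∈ U) :
    ∀ (reachable todo : List String) (h : ∀ x ∈ todo, x ∈ U),
      (∀ a ∈ reachable, ∀ b, pvStep g nts a b → b ∈ reachable ∨ b ∈ todo) →
      (∀ x ∈ reachable, x ∈ pvLoopA g nts U hU reachable todo h) ∧
      (∀ x ∈ todo, x ∈ pvLoopA g nts U hU reachable todo h) ∧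
      (∀ a ∈ pvLoopA g nts U hU reachable todo h, ∀ b, pvStep g nts a b → b ∈ pvLoopA g nts U hU reachable todo h) := by
  intro reachable todo h
  induction reachable, todo, h using pvLoopA.induct g nts U hU with
  | case1 reachable h =>
    intro hInv
    refine ⟨?_, ?_, ?_⟩
    · intro x hx; rw [pvLoopA]; exact hx
    · intro x hx; exact absurd hx (List.not_mem_nil)
    · intro a ha b hstep
      rw [pvLoopA] at ha ⊢
      rcases hInv a ha b hstep with hb | hb
      · exact hb
      · exact absurd hb (List.not_mem_nil)
  | case2 reachable current rest h2 hc h ih =>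
    intro hInv
    have hInv' : ∀ a ∈ reachable, ∀ b, pvStep g nts a b → b ∈ reachable ∨ b ∈ rest := by
      intro a ha b hstep
      rcases hInv a ha b hstep with hb | hb
      · exact Or.inl hb
      · rcases List.mem_cons.1 hb with rfl | hb
        · exact Or.inl hc
        · exact Or.inr hb
    obtain ⟨ih1, ih2, ih3⟩ := ih hInv'
    refine ⟨?_, ?_, ?_⟩
    · intro x hx; rw [pvLoopA, dif_pos hc]; exact ih1 x hx
    · intro x hx
      rw [pvLoopA, dif_pos hc]
      rcases List.mem_cons.1 hx with rfl | hx
      · exact ih1 x hc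
      · exact ih2 x hx
    · intro a ha b hstep
      rw [pvLoopA, dif_pos hc] at ha ⊢
      exact ih3 a ha b hstep
  | case3 reachable current rest h2 hc reachable' todo' h ih =>
    intro hInv
    have hInv' : ∀ a ∈ reachable', ∀ b, pvStep g nts a b → b ∈ reachable' ∨ b ∈ todo' := by
      intro a ha b hstep
      rcases (PySem.Set.mem_add ..).1 ha with ha' | rfl
      · rcases hInv a ha' b hstep with hb | hb
        · exact Or.inl ((PySem.Set.mem_add ..).2 (Or.inl hb))
        · rcases List.mem_cons.1 hb with rfl | hb
          · exact Or.inl ((PySem.Set.mem_add ..).2 (Or.inr rfl))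
          · exact Or.inr ((pvProdsFold_mem ..).2 (Or.inl hb))
      · obtain ⟨hbn, p, hp, hbp⟩ := hstep
        by_cases hbr : b ∈ reachable'
        · exact Or.inl hbr
        · exact Or.inr ((pvProdsFold_mem ..).2 (Or.inr ⟨hbn, hbr, p, hp, hbp⟩))
    obtain ⟨ih1, ih2, ih3⟩ := ih hInv'
    refine ⟨?_, ?_, ?_⟩
    · intro x hx
      rw [pvLoopA, dif_neg hc]
      exact ih1 x ((PySem.Set.mem_add ..).2 (Or.inl hx))
    · intro x hx
      rw [pvLoopA, dif_neg hc]
      rcases List.mem_cons.1 hx with rfl | hx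
      · exact ih1 x ((PySem.Set.mem_add ..).2 (Or.inr rfl))
      · exact ih2 x ((pvProdsFold_mem ..).2 (Or.inl hx))
    · intro a ha b hstep
      rw [pvLoopA, dif_neg hc] at ha ⊢
      exact ih3 a ha b hstep

-- ---- B's saturation computes exactly the same closure ----
theorem pvSatB_sound (g : PySem.Dict String (List (List String))) (nts U : List String)
    (hU : ∀ x ∈ nts, x ∈ U) :
    ∀ (reachable : List String) (h : ∀ x ∈ reachable, x ∈ U) (x : String),
      x ∈ pvSatB g nts U hU reachable h →
      ∃ t ∈ reachable, Relation.ReflTransGen (pvStep g nts) t x := by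
  intro reachable h
  induction reachable, h using pvSatB.induct g nts U hU with
  | case1 reachable h new hn =>
    intro x hx
    rw [pvSatB, dif_pos hn] at hx
    exact ⟨x, hx, Relation.ReflTransGen.refl⟩
  | case2 reachable h new hn ih =>
    intro x hx
    rw [pvSatB, dif_neg hn] at hx
    rcases ih x hx with ⟨t, ht, hr⟩
    rcases (PySem.Set.mem_union ..).1 ht with ht' | ht'
    · exact ⟨t, ht', hr⟩
    · obtain ⟨tn, tnr, a, ha, p, hp, htp⟩ := (pvNewB_mem ..).1 ht'
      exact ⟨a, ha, Relation.ReflTransGen.head ⟨tn, p, hp, htp⟩ hr⟩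

theorem pvSatB_complete (g : PySem.Dict String (List (List String))) (nts U : List String)
    (hU : ∀ x ∈ nts, x ∈ U) :
    ∀ (reachable : List String) (h : ∀ x ∈ reachable, x ∈ U),
      (∀ x ∈ reachable, x ∈ pvSatB g nts U hU reachable h) ∧
      (∀ a ∈ pvSatB g nts U hU reachable h, ∀ b, pvStep g nts a b → b ∈ pvSatB g nts U hU reachable h) := by
  intro reachable h
  induction reachable, h using pvSatB.induct g nts U hU with
  | case1 reachable h new hn =>
    refine ⟨?_, ?_⟩
    · intro x hx; rw [pvSatB, dif_pos hn]; exact hx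
    · intro a ha b hstep
      rw [pvSatB, dif_pos hn] at ha ⊢
      by_cases hbr : b ∈ reachable
      · exact hbr
      · have h2 : b ∈ new := (pvNewB_mem ..).2 ⟨hstep.1, hbr, a, ha, hstep.2⟩
        rw [hn] at h2
        exact absurd h2 (List.not_mem_nil)
    | case2 reachable h new hn ih =>
    obtain ⟨ih1, ih2⟩ := ih
    refine ⟨?_, ?_⟩
    · intro x hx
      rw [pvSatB, dif_neg hn]
      exact ih1 x ((PySem.Set.mem_union ..).2 (Or.inl hx))
    · intro a ha b hstep
      rw [pvSatB, dif_neg hn] at ha ⊢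
      exact ih2 a ha b hstep

theorem pvDiff_congr (s t1 t2 : List String) (h : ∀ x, x ∈ t1 ↔ x ∈ t2) :
    PySem.Set.diff s t1 = PySem.Set.diff s t2 := by
  simp only [PySem.Set.diff]
  apply List.filter_congr
  intro x _
  simp [h x]

-- ===== VERDICT (by name: the statement is the Claim_ definition above) =====
theorem find_unreachable_nonterminals_spec : Claim_equal_find_unreachable_nonterminals := by
  intro grammar start_symbol non_terminals _hdom
  unfold Spec_find_unreachable_nonterminals find_unreachable_nonterminals find_unreachable_nonterminals_alt
  apply pvDiff_congr
  intro x
  constructor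
  · intro hx
    rcases pvLoopA_sound _ _ _ _ _ _ _ x hx with h1 | ⟨t, ht, hr⟩
    · exact absurd h1 (List.not_mem_nil)
    · rw [List.mem_singleton.1 ht] at hr
      obtain ⟨ihb1, ihb2⟩ := pvSatB_complete (PySem.Dict.mk grammar) non_terminals
        (start_symbol :: non_terminals) (fun x hx => List.mem_cons_of_mem _ hx)
        [start_symbol] (fun x hx => by simp_all)
      have hstart := ihb1 start_symbol (List.mem_singleton.2 rfl)
      clear hx
      induction hr with
      | refl => exact hstart
      | tail hab hbc ih => exact ihb2 _ ih _ hbc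
  · intro hx
    rcases pvSatB_sound _ _ _ _ _ _ x hx with ⟨t, ht, hr⟩
    obtain ⟨iha1, iha2, iha3⟩ := pvLoopA_complete (PySem.Dict.mk grammar) non_terminals
      (start_symbol :: non_terminals) (fun x hx => List.mem_cons_of_mem _ hx)
      [] [start_symbol] (fun x hx => by simp_all)
      (fun a ha => absurd ha (List.not_mem_nil))
    rw [List.mem_singleton.1 ht] at hr
    have hstart := iha2 start_symbol (List.mem_singleton.2 rfl)
    clear hx
    induction hr with
    | refl => exact hstart
    | tail hab hbc ih => exact iha3 _ ih _ hbc
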